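-- pv_equiv track=rewrite | github.com/CCAgentOrg/picorouter | picorouter/models.py | format_model_list
-- ===== SOURCE A (Python) =====
-- def format_model_list(models: list) -> str:
--     """Format model list for display."""
--     if not models:
--         return "No models found."
--
--     lines = ["📋 Available Models", "=" * 40]
--
--     # Group by provider
--     by_provider = {}
--     for m in models:
--         prov = m.get("provider", "unknown")
--         if prov not in by_provider:
--             by_provider[prov] = []
--         by_provider[prov].append(m.get("model", ""))
--
--     for prov, model_list in sorted(by_provider.items()):
--         lines.append(f"\n🔹 {prov}")
--         for model in model_list[:5]:
--             lines.append(f"   • {model}")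
--         if len(model_list) > 5:
--             lines.append(f"   ... and {len(model_list) - 5} more")
--
--     return "\n".join(lines)
-- ===== SOURCE B (Python) =====
-- def format_model_list(models: list) -> str:
--     """Format model list for display."""
--     if not models:
--         return "No models found."
--
--     def section(prov):
--         names = [m.get("model", "") for m in models
--                  if m.get("provider", "unknown") == prov]
--         body = "".join(f"\n   • {n}" for n in names[:5])
--         more = f"\n   ... and {len(names) - 5} more" if len(names) > 5 else ""
--         return f"\n\n🔹 {prov}" + body + more
--
--     provs = sorted({m.get("provider", "unknown") for m in models})
--     return "📋 Available Models\n" + "=" * 40 + "".join(map(section, provs))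
-- ===== Notes on version B (the rewrite author's own statement) =====
-- stated objective: alternative
-- what changed: Instead of building a dict of lists and then a flat lines list joined with '\n', B sorts the set of providers, renders each provider's whole section directly as one string (with the '\n' separators baked in) via a per-provider filter, and concatenates header plus sections with no intermediate lines list.
import Mathlib
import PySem

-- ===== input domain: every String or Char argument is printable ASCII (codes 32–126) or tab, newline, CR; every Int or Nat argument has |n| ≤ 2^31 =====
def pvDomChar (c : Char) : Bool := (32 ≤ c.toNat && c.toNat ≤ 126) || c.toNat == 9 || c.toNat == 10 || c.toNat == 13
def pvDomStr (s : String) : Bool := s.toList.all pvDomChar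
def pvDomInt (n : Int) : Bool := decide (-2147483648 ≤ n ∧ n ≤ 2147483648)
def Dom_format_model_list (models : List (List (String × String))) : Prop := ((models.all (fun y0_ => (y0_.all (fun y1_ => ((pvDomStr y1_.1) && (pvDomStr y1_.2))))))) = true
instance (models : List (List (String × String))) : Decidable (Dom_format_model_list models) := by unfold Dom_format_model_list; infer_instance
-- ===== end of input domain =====

-- B drops A's dict-of-lists grouping and flat lines list: it sorts the set of providers,
-- renders each provider's whole section directly as one string (separators baked in) and
-- concatenates header plus sections (objective: alternative).

-- m.get(k, dflt) on a model dict (assoc list, first match wins)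
def pvGet (m : List (String × String)) (k dflt : String) : String :=
  (PySem.Dict.mk m).getD k dflt

-- ===== PORT A =====
def format_model_list (models : List (List (String × String))) : String :=
  if models = [] then "No models found."
  else
    let lines : List String := ["📋 Available Models", String.ofList (List.replicate 40 '=')]
    let by_provider : PySem.Dict String (List String) :=
      models.foldl (fun d m =>
        let prov := pvGet m "provider" "unknown"
        let d := if d.contains prov then d else d.insert prov []
        d.modify prov [] (fun l => l ++ [pvGet m "model" ""])) PySem.Dict.empty
    -- sorted(by_provider.items()): dict keys are distinct, so Python's tuple order
    -- on the items is exactly the order of the first components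
    let lines := (PySem.List.sorted by_provider.items (fun p => p.1) false).foldl
      (fun lines pr =>
        let lines := lines ++ ["\n🔹 " ++ pr.1]
        let lines := (PySem.List.slice pr.2 none (some 5)).foldl
          (fun lines model => lines ++ ["   • " ++ model]) lines
        if 5 < pr.2.length then
          lines ++ ["   ... and " ++ PySem.Int.toStr ((pr.2.length : Int) - 5) ++ " more"]
        else lines) lines
    PySem.Str.join "\n" lines

-- ===== PORT B =====
-- the section string (with its leading separators) for one provider
def pvSection (models : List (List (String × String))) (prov : String) : String :=
  let names := (models.filter (fun m => pvGet m "provider" "unknown" == prov)).map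
    (fun m => pvGet m "model" "")
  let body := PySem.Str.join ""
    ((PySem.List.slice names none (some 5)).map (fun n => "\n   • " ++ n))
  let more := if 5 < names.length then
      "\n   ... and " ++ PySem.Int.toStr ((names.length : Int) - 5) ++ " more"
    else ""
  ("\n\n🔹 " ++ prov) ++ body ++ more

def format_model_list_alt (models : List (List (String × String))) : String :=
  if models = [] then "No models found."
  else
    let provs := PySem.List.sorted
      (PySem.Set.ofList (models.map (fun m => pvGet m "provider" "unknown")))
      (fun p => p) false
    "📋 Available Models\n" ++ String.ofList (List.replicate 40 '=') ++
      PySem.Str.join "" (provs.map (pvSection models))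

-- ===== PRECONDITION & SPEC =====
def Spec_format_model_list (models : List (List (String × String))) (out : String) : Prop := out = format_model_list_alt models
instance (models : List (List (String × String))) (out : String) : Decidable (Spec_format_model_list models out) := by unfold Spec_format_model_list; infer_instance

-- ===== CLAIM (what is proved, stated in full; the proofs are below) =====
def Claim_equal_format_model_list : Prop := ∀ (models : List (List (String × String))), Dom_format_model_list models → Spec_format_model_list models (format_model_list models)

-- ===== LEMMAS AND PROOFS =====

-- the provider / model-name keys of a model
def pvProv (m : List (String × String)) : String := pvGet m "provider" "unknown"
def pvName (m : List (String × String)) : String := pvGet m "model" ""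
-- model names of a given provider, in input order
def pvV (models : List (List (String × String))) (p : String) : List String :=
  (models.filter (fun m => pvProv m == p)).map pvName

-- the lines A emits for one provider group (k, v)
def pvAsec (k : String) (v : List String) : List String :=
  ["\n🔹 " ++ k] ++ (PySem.List.slice v none (some 5)).map (fun model => "   • " ++ model)
    ++ (if 5 < v.length then
          ["   ... and " ++ PySem.Int.toStr ((v.length : Int) - 5) ++ " more"]
        else [])

-- Dict.modify is literally insert of the modified value (definitional in PySem)
lemma pv_modify_eq_insert (d : PySem.Dict String (List String)) (k : String)
    (d0 : List String) (f : List String → List String) :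
    d.modify k d0 f = d.insert k (f (d.getD k d0)) := rfl

-- A's loop body ('if prov not in d: d[prov] = []' then append) is one modify
lemma pv_step_eq (d : PySem.Dict String (List String)) (p v : String) :
    (if d.contains p then d else d.insert p []).modify p [] (fun l => l ++ [v])
      = d.modify p [] (fun l => l ++ [v]) := by
  by_cases h : d.contains p = true
  · simp [h]
  · simp only [Bool.not_eq_true] at h
    simp only [h, Bool.false_eq_true, if_false]
    rw [pv_modify_eq_insert, pv_modify_eq_insert,
      PySem.Dict.getD_insert_self, PySem.Dict.insert_insert_self,
      PySem.Dict.getD_of_not_contains d ([] : List String) h]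

-- A's dict fold, rewritten as the canonical keyed modify-fold over (prov, name) pairs
lemma pv_fold_eq (models : List (List (String × String))) :
    models.foldl (fun d m =>
        let prov := pvGet m "provider" "unknown"
        let d := if d.contains prov then d else d.insert prov []
        d.modify prov [] (fun l => l ++ [pvGet m "model" ""])) PySem.Dict.empty
      = (models.map (fun m => (pvProv m, pvName m))).foldl
          (fun d p => d.modify p.1 [] (fun l => l ++ [p.2])) PySem.Dict.empty := by
  rw [List.foldl_map]
  apply PySem.List.foldl_congr_mem
  intro d m _
  exact pv_step_eq d (pvProv m) (pvName m)

-- the sorted items of A's dict, explicitly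
lemma pv_sorted_items (models : List (List (String × String))) :
    PySem.List.sorted
      ((models.map (fun m => (pvProv m, pvName m))).foldl
          (fun d p => d.modify p.1 [] (fun l => l ++ [p.2])) PySem.Dict.empty).items
      (fun p => p.1) false
    = (PySem.List.sorted (PySem.List.dedup (models.map pvProv)) (fun p => p) false).map
        (fun k => (k, pvV models k)) := by
  set pairs := models.map (fun m => (pvProv m, pvName m)) with hpairs
  set D := pairs.foldl (fun d p => d.modify p.1 [] (fun l => l ++ [p.2])) PySem.Dict.empty with hD
  have hnd : D.keys.Nodup := by
    rw [hD]
    exact PySem.Dict.nodup_keys_foldl_modify_key pairs (fun p => p.1) []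
      (fun _ p v => v ++ [p.2]) PySem.Dict.empty PySem.Dict.nodup_keys_empty
  have hkeys : D.keys = PySem.List.dedup (models.map pvProv) := by
    rw [hD, PySem.Dict.keys_foldl_modify_key, PySem.Dict.keys_empty,
      PySem.Set.update_nil_left, PySem.List.dedup_eq_ofList, hpairs, List.map_map]
    rfl
  have hgetD : ∀ c, D.getD c [] = pvV models c := by
    intro c
    rw [hD, PySem.Dict.getD_foldl_modify_append, PySem.Dict.getD_empty, hpairs,
      List.filter_map, List.map_map]
    unfold pvV
    congr 1
  have hitems : D.items = (PySem.List.dedup (models.map pvProv)).map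
      (fun k => (k, pvV models k)) := by
    rw [PySem.Dict.items_eq_map_keys D hnd ([] : List String), hkeys]
    exact List.map_congr_left (fun k _ => by rw [hgetD k])
  have hperm : ((PySem.List.sorted (PySem.List.dedup (models.map pvProv)) (fun p => p) false).map
      (fun k => (k, pvV models k))).Perm D.items := by
    rw [hitems]
    exact (PySem.List.sorted_perm _ _ _).map _
  have hlt : ((PySem.List.sorted (PySem.List.dedup (models.map pvProv)) (fun p => p) false).map
      (fun k => (k, pvV models k))).Pairwise
      (fun a b : String × List String => a.1 < b.1) := by
    rw [List.pairwise_map]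
    have hle := PySem.List.sorted_pairwise (PySem.List.dedup (models.map pvProv)) (fun p => p)
    have hnodup : (PySem.List.sorted (PySem.List.dedup (models.map pvProv)) (fun p => p) false).Nodup :=
      (PySem.List.sorted_perm _ _ _).nodup_iff.mpr
        (by rw [PySem.List.dedup_eq_ofList]; exact PySem.Set.nodup_ofList _)
    exact (hle.and hnodup).imp (fun h => lt_of_le_of_ne h.1 h.2)
  exact PySem.List.sorted_eq_of_perm_of_pairwise_lt _ _ _ hperm hlt

-- A's per-group loop body appends exactly the group's section lines
lemma pv_body (lines : List String) (k : String) (v : List String) :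
    (let l1 := lines ++ ["\n🔹 " ++ k]
     let l2 := (PySem.List.slice v none (some 5)).foldl
        (fun l model => l ++ ["   • " ++ model]) l1
     if 5 < v.length then
        l2 ++ ["   ... and " ++ PySem.Int.toStr ((v.length : Int) - 5) ++ " more"]
     else l2)
      = lines ++ pvAsec k v := by
  simp only [PySem.List.foldl_append_singleton_eq_map]
  unfold pvAsec
  split_ifs <;> simp

-- A's lines, as the headers plus the concatenated per-provider sections
lemma pv_lines_eq (models : List (List (String × String))) (lines0 : List String) :
    ((PySem.List.sorted (PySem.List.dedup (models.map pvProv)) (fun p => p) false).map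
        (fun k => (k, pvV models k))).foldl
      (fun lines pr =>
        let l1 := lines ++ ["\n🔹 " ++ pr.1]
        let l2 := (PySem.List.slice pr.2 none (some 5)).foldl
          (fun l model => l ++ ["   • " ++ model]) l1
        if 5 < pr.2.length then
          l2 ++ ["   ... and " ++ PySem.Int.toStr ((pr.2.length : Int) - 5) ++ " more"]
        else l2) lines0
    = lines0 ++ (PySem.List.sorted (PySem.List.dedup (models.map pvProv)) (fun p => p) false).flatMap
        (fun k => pvAsec k (pvV models k)) := by
  rw [List.foldl_map]
  rw [PySem.List.foldl_congr_mem _ _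
    (fun (lines : List String) k => lines ++ pvAsec k (pvV models k))
    lines0 (fun lines k _ => pv_body lines k (pvV models k))]
  exact PySem.List.foldl_append_eq_flatMap _ _ _

-- '\n'.join of a nonempty list, at the character level
lemma pv_join_cons (sep a : List Char) (l : List (List Char)) :
    PySem.Chars.join sep (a :: l) = a ++ (l.map (fun x => sep ++ x)).flatten := by
  induction l generalizing a with
  | nil => simp [PySem.Chars.join_singleton]
  | cons b t ih => rw [PySem.Chars.join_cons_cons, ih b]; simp

-- ''.join is flatten
lemma pv_join_nil_sep (l : List (List Char)) :
    PySem.Chars.join [] l = l.flatten := by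
  cases l with
  | nil => simp [PySem.Chars.join_nil]
  | cons a t => rw [pv_join_cons]; simp

-- flatten/map over a flatMap, regrouped per source element
lemma pv_flatten_flatMap {α β γ : Type} (l : List α) (g : α → List β) (h : β → List γ) :
    ((l.flatMap g).map h).flatten
      = (l.map (fun k => ((g k).map h).flatten)).flatten := by
  induction l with
  | nil => simp
  | cons x t ih => simp [ih]

-- one provider's section lines, each prefixed with the '\n' separator and
-- concatenated, are exactly B's section string
lemma pv_sec_eq (models : List (List (String × String))) (k : String) :
    ((pvAsec k (pvV models k)).map
        (fun s => ("\n" : String).toList ++ s.toList)).flatten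
      = (pvSection models k).toList := by
  have hnames : (models.filter (fun m => pvGet m "provider" "unknown" == k)).map
      (fun m => pvGet m "model" "") = pvV models k := rfl
  unfold pvSection pvAsec
  simp only [hnames]
  have hbody : (PySem.Str.join ""
      ((PySem.List.slice (pvV models k) none (some 5)).map (fun n => "\n   • " ++ n))).toList
      = ((PySem.List.slice (pvV models k) none (some 5)).map
          (fun n => ("\n   • " ++ n).toList)).flatten := by
    simp only [PySem.Str.join, String.toList_ofList,
      show ("" : String).toList = [] from rfl]
    rw [pv_join_nil_sep, List.map_map]
    rfl
  split_ifs with h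
  · simp only [List.map_append, List.map_cons, List.map_nil, List.map_map,
      Function.comp_def, List.flatten_append, List.flatten_cons, List.flatten_nil,
      List.append_nil, String.toList_append, hbody]
    simp [List.append_assoc]
  · simp only [List.map_append, List.map_cons, List.map_nil, List.map_map,
      Function.comp_def, List.flatten_append, List.flatten_cons, List.flatten_nil,
      List.append_nil, String.toList_append, hbody,
      show ("" : String).toList = [] from rfl]
    simp

-- ===== VERDICT (by name: the statement is the Claim_ definition above) =====
theorem format_model_list_spec : Claim_equal_format_model_list := by
  intro models _
  unfold Spec_format_model_list format_model_list format_model_list_alt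
  by_cases h : models = []
  · simp [h]
  · simp only [h, if_false]
    rw [pv_fold_eq, pv_sorted_items, pv_lines_eq]
    rw [show (models.map (fun m => pvGet m "provider" "unknown")) = models.map pvProv from rfl,
      ← PySem.List.dedup_eq_ofList]
    set P := PySem.List.sorted (PySem.List.dedup (models.map pvProv)) (fun p => p) false with hP
    apply String.toList_inj.mp
    simp only [PySem.Str.join, String.toList_ofList, String.toList_append,
      show ("" : String).toList = ([] : List Char) from rfl]
    simp only [List.map_cons, List.cons_append, List.nil_append]
    rw [pv_join_cons, pv_join_nil_sep]
    simp only [List.map_cons, List.flatten_cons, List.map_map, Function.comp_def]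
    rw [pv_flatten_flatMap]
    have hmap : P.map (fun k => ((pvAsec k (pvV models k)).map
        (fun s => ("\n" : String).toList ++ s.toList)).flatten)
        = P.map (fun k => (pvSection models k).toList) := by
      exact List.map_congr_left (fun k _ => pv_sec_eq models k)
    rw [hmap]
    rw [show ("📋 Available Models\n" : String).toList
        = ("📋 Available Models" : String).toList ++ ("\n" : String).toList by
      rw [← String.toList_append]; rfl]
    simp
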